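-- pv_equiv track=rewrite | github.com/smolkelab/promoter_design | model_interpretation/score_first_conv_layer.py | int_to_indices_seq
-- ===== SOURCE A (Python) =====
-- BASEFOUR_DICT = {'00':0, '01':1, '10':2, '11':3}
--
-- def int_to_indices_seq(idx):
--   assert idx >= 0 and idx < 4**8
--   # convert to list of binary digits, zero-padding as needed
--   idx = [q for q in bin(idx)[2:] ]
--   idx = ['0']*(16 - len(idx)) + idx
--   idxes_out = []
--   while len(idx) > 0:
--     idxes_out.append(BASEFOUR_DICT[''.join([idx.pop(0), idx.pop(0)])])
--   return idxes_out
-- ===== SOURCE B (Python) =====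
-- def int_to_indices_seq(idx):
--   assert idx >= 0 and idx < 4**8
--   digits = []
--   for _ in range(8):
--     idx, r = divmod(idx, 4)
--     digits.append(r)
--   return digits[::-1]
-- ===== Notes on version B (the rewrite author's own statement) =====
-- stated objective: idiomatic
-- what changed: Computes the 8 base-4 digits directly with divmod positional arithmetic (LSD-first, then reversed) instead of building a zero-padded binary string and decoding bit pairs through a dict.
import Mathlib
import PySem

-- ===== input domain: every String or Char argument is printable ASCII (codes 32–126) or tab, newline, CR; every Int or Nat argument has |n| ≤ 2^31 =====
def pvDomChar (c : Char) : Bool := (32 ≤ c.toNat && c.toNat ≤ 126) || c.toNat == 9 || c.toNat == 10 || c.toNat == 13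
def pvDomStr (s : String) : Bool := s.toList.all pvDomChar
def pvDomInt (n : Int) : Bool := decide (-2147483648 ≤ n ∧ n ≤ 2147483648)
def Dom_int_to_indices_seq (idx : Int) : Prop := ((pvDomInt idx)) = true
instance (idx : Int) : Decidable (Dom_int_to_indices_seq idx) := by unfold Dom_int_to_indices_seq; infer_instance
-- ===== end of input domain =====

-- B replaces A's binary-string + dict decoding by direct divmod positional arithmetic (idiomatic; same cost).


-- ===== PORT A =====
-- bin(n)[2:] for n > 0 (most-significant bit first, no leading zeros); [] for n = 0
def pvRawBin (n : Nat) : List Char :=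
  if _h : n = 0 then [] else pvRawBin (n / 2) ++ [if n % 2 = 1 then '1' else '0']
decreasing_by exact Nat.div_lt_self (Nat.pos_of_ne_zero _h) (by omega)

-- bin(n)[2:] for n ≥ 0 (Python prints '0' for 0)
def pvBin (n : Nat) : List Char := if n = 0 then ['0'] else pvRawBin n

def BASEFOUR_DICT : PySem.Dict String Int :=
  PySem.Dict.ofList [("00", 0), ("01", 1), ("10", 2), ("11", 3)]

-- the while loop: pops two chars off the front, looks their pair up in BASEFOUR_DICT, appends.
-- (Python's d[k] raises KeyError on a missing key and pop(0) raises on an odd-length tail; both are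
-- unreachable here: the list always holds 16 chars from {'0','1'}, so getD's default is never used.)
def pvPairLoop (idx : List Char) (idxes_out : List Int) : List Int :=
  match idx with
  | c1 :: c2 :: rest => pvPairLoop rest (idxes_out ++ [BASEFOUR_DICT.getD (String.mk [c1, c2]) 0])
  | _ => idxes_out

def int_to_indices_seq (idx : Int) : List Int :=
  let bits := pvBin idx.toNat          -- exact for idx ≥ 0 (guaranteed by the assert / Pre_)
  let padded := List.replicate (16 - bits.length) '0' ++ bits
  pvPairLoop padded []

-- ===== PORT B =====
-- for _ in range(8): idx, r = divmod(idx, 4); digits.append(r)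
def pvDivLoop : Nat → Int → List Int → List Int
  | 0, _, digits => digits
  | k + 1, m, digits =>
    match PySem.Int.divmod? m 4 with
    | some (q, r) => pvDivLoop k q (digits ++ [r])
    | none => digits     -- unreachable: the divisor is the literal 4

def int_to_indices_seq_alt (idx : Int) : List Int :=
  (pvDivLoop 8 idx []).reverse

-- ===== PRECONDITION & SPEC =====
-- Pre_ excludes exactly the inputs on which A's `assert idx >= 0 and idx < 4**8` raises AssertionError.
def Pre_int_to_indices_seq (idx : Int) : Prop := 0 ≤ idx ∧ idx < 65536
instance (idx : Int) : Decidable (Pre_int_to_indices_seq idx) := by unfold Pre_int_to_indices_seq; infer_instance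
def pvWitness_int_to_indices_seq : Int := (12345)

def Spec_int_to_indices_seq (idx : Int) (out : List Int) : Prop := out = int_to_indices_seq_alt idx
instance (idx : Int) (out : List Int) : Decidable (Spec_int_to_indices_seq idx out) := by unfold Spec_int_to_indices_seq; infer_instance

-- ===== CLAIM (what is proved, stated in full; the proofs are below) =====
def Claim_equal_int_to_indices_seq : Prop := ∀ (idx : Int), Dom_int_to_indices_seq idx → Pre_int_to_indices_seq idx → Spec_int_to_indices_seq idx (int_to_indices_seq idx)

-- ===== LEMMAS AND PROOFS =====

-- big-endian base-4 digits of n, k of them (Nat-valued reference list)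
def pvDigN : Nat → Nat → List Nat
  | 0, _ => []
  | k + 1, n => pvDigN k (n / 4) ++ [n % 4]

-- big-endian base-2 digits of n, k of them, as chars
def pvBitChar (m : Nat) : Char := if m % 2 = 1 then '1' else '0'

def pvBitsBE : Nat → Nat → List Char
  | 0, _ => []
  | k + 1, n => pvBitsBE k (n / 2) ++ [pvBitChar n]

def pvTwoChars (d : Nat) : List Char := [pvBitChar (d / 2), pvBitChar d]

-- B side -------------------------------------------------------------------

theorem pvDivLoop_eq (k : Nat) : ∀ (n : Nat) (acc : List Int),
    pvDivLoop k (n : Int) acc = acc ++ ((pvDigN k n).reverse.map Int.ofNat) := by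
  induction k with
  | zero => intro n acc; simp [pvDivLoop, pvDigN]
  | succ k ih =>
    intro n acc
    have hd : PySem.Int.divmod? (n : Int) 4 = some (((n / 4 : Nat) : Int), ((n % 4 : Nat) : Int)) := by
      simp [PySem.Int.divmod?, Int.fdiv_eq_ediv, Int.fmod_eq_emod]
    simp only [pvDivLoop, hd]
    rw [ih]
    simp [pvDigN]

-- A side -------------------------------------------------------------------

theorem pvRawBin_len (k : Nat) : ∀ n : Nat, n < 2 ^ k → (pvRawBin n).length ≤ k := by
  induction k with
  | zero => intro n h; interval_cases n; simp [pvRawBin]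
  | succ k ih =>
    intro n h
    by_cases h0 : n = 0
    · subst h0; simp [pvRawBin]
    · rw [pvRawBin, dif_neg h0]
      have := ih (n / 2) (by omega)
      simp; omega

theorem pvBitsBE_zero (k : Nat) : pvBitsBE k 0 = List.replicate k '0' := by
  induction k with
  | zero => rfl
  | succ k ih => simp [pvBitsBE, ih, pvBitChar, List.replicate_succ']

-- the padded binary string equals the fixed-width bit list
theorem pvRawBin_pad (k : Nat) : ∀ n : Nat, 0 < n → n < 2 ^ k →
    List.replicate (k - (pvRawBin n).length) '0' ++ pvRawBin n = pvBitsBE k n := by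
  induction k with
  | zero => intro n h0 h; omega
  | succ k ih =>
    intro n h0 h
    rw [pvRawBin, dif_neg (by omega : n ≠ 0)]
    by_cases h2 : n / 2 = 0
    · have hn : n = 1 := by omega
      subst hn
      simp [pvBitsBE, pvBitsBE_zero, pvBitChar, pvRawBin]
    · have ihn := ih (n / 2) (by omega) (by omega)
      have hlen := pvRawBin_len k (n / 2) (by omega)
      rw [pvBitsBE, ← ihn]
      have hc : pvBitChar n = if n % 2 = 1 then '1' else '0' := rfl
      rw [hc, List.append_assoc]
      congr 2
      simp
      try omega

theorem pvBin_pad (k : Nat) (n : Nat) (hk : 0 < k) (h : n < 2 ^ k) :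
    List.replicate (k - (pvBin n).length) '0' ++ pvBin n = pvBitsBE k n := by
  by_cases h0 : n = 0
  · subst h0
    simp [pvBin, pvBitsBE_zero]
    rw [show k = (k - 1) + 1 by omega, List.replicate_succ']
    simp
  · rw [pvBin, if_neg h0]
    exact pvRawBin_pad k n (by omega) h

-- fixed-width bits are the flatMap of two-bit chunks of the base-4 digits
theorem pvBitsBE_flat (k : Nat) : ∀ n : Nat,
    pvBitsBE (2 * k) n = (pvDigN k n).flatMap pvTwoChars := by
  induction k with
  | zero => intro n; rfl
  | succ k ih =>
    intro n
    have h1 : 2 * (k + 1) = (2 * k + 1) + 1 := by ring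
    rw [h1, pvBitsBE, pvBitsBE, ih (n / 2 / 2)]
    have e1 : n / 2 / 2 = n / 4 := by omega
    have e2 : pvBitChar (n / 2) = pvBitChar (n % 4 / 2) := by
      unfold pvBitChar
      rw [show n / 2 % 2 = n % 4 / 2 % 2 by omega]
    have e3 : pvBitChar n = pvBitChar (n % 4) := by
      unfold pvBitChar
      rw [show n % 2 = n % 4 % 2 by omega]
    rw [e1, e2, e3, pvDigN]
    simp only [pvTwoChars, List.flatMap_append, List.flatMap_cons, List.flatMap_nil,
      List.append_nil]
    rw [List.append_assoc]
    rfl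

theorem pvDigN_lt (k : Nat) : ∀ n d, d ∈ pvDigN k n → d < 4 := by
  induction k with
  | zero => intro n d h; simp [pvDigN] at h
  | succ k ih =>
    intro n d h
    simp [pvDigN] at h
    rcases h with h | h
    · exact ih _ _ h
    · omega

theorem pvPairLoop_flat : ∀ (ds : List Nat) (acc : List Int), (∀ d ∈ ds, d < 4) →
    pvPairLoop (ds.flatMap pvTwoChars) acc = acc ++ ds.map Int.ofNat := by
  intro ds
  induction ds with
  | nil => intro acc _; simp [pvPairLoop]
  | cons d ds ih =>
    intro acc h
    have hd : d < 4 := h d (by simp)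
    have step : pvPairLoop (pvTwoChars d ++ ds.flatMap pvTwoChars) acc
        = pvPairLoop (ds.flatMap pvTwoChars)
            (acc ++ [BASEFOUR_DICT.getD (String.mk (pvTwoChars d)) 0]) := by
      rfl
    have hval : BASEFOUR_DICT.getD (String.mk (pvTwoChars d)) 0 = Int.ofNat d := by
      interval_cases d <;> decide
    rw [List.flatMap_cons, step, hval, ih _ (fun x hx => h x (by simp [hx]))]
    simp

-- ===== VERDICT (by name: the statement is the Claim_ definition above) =====
theorem int_to_indices_seq_spec : Claim_equal_int_to_indices_seq := by
  intro idx _hdom hpre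
  obtain ⟨h0, h1⟩ := hpre
  unfold Spec_int_to_indices_seq int_to_indices_seq int_to_indices_seq_alt
  set n := idx.toNat with hn
  have hidx : (n : Int) = idx := Int.toNat_of_nonneg h0
  have hlt : n < 2 ^ 16 := by omega
  rw [← hidx, pvDivLoop_eq 8 n []]
  show pvPairLoop (List.replicate (16 - (pvBin n).length) '0' ++ pvBin n) [] = _
  rw [pvBin_pad 16 n (by omega) hlt, show (16 : Nat) = 2 * 8 from rfl, pvBitsBE_flat 8 n,
    pvPairLoop_flat (pvDigN 8 n) [] (fun d hd => pvDigN_lt 8 n d hd)]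
  simp
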